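-- pv_equiv track=rewrite | github.com/aldalee/hw-od | k24_逻辑分析/最长的密码.py | find_longest_password
-- ===== SOURCE A (Python) =====
-- def find_longest_password(passwords):
--     # 将密码本中的密码存储到set中，便于查找
--     password_set = set(passwords)
--     result = ""
--     for password in passwords:
--         # 对于每个密码，从它的末尾开始依次去掉一位，判断新密码是否在密码本中存在
--         for i in range(len(password) - 1, -1, -1):
--             new_password = password[:i] + password[i + 1:]
--             if new_password in password_set:
--                 # 如果新密码在密码本中存在，则将当前密码与之前的结果比较
--                 if len(password) > len(result) or (len(password) == len(result) and password > result):
--                     result = password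
--                 break
--     return result
-- ===== SOURCE B (Python) =====
-- def find_longest_password(passwords):
--     password_set = set(passwords)
--     for p in sorted(passwords, key=lambda q: (len(q), q), reverse=True):
--         if any(p[:i] + p[i + 1:] in password_set for i in range(len(p))):
--             return p
--     return ""
-- ===== Notes on version B (the rewrite author's own statement) =====
-- stated objective: alternative
-- what changed: Replaces A's single-pass running-best accumulator (with a from-the-end inner scan and break) by an order-first strategy: sort the passwords descending by (length, lexicographic) and return the first one whose single-character deletion is in the set, '' if none.
import Mathlib
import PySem

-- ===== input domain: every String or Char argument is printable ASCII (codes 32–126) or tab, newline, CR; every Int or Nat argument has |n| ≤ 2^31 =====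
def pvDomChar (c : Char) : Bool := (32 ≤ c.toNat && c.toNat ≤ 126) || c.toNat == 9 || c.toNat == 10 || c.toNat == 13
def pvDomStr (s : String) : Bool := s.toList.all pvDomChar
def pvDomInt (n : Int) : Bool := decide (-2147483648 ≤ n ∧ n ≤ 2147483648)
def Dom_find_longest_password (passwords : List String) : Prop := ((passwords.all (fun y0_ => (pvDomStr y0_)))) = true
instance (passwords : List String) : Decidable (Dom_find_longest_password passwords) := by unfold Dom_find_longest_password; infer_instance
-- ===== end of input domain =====

-- B replaces A's running-best accumulator by sort-descending-then-first-hit; alternative decomposition, same results.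


-- ===== PORT A =====
-- password[:i] + password[i+1:]
def pvDelA (p : String) (i : Int) : String :=
  String.mk (PySem.Chars.slice p.toList none (some i) ++ PySem.Chars.slice p.toList (some (i + 1)) none)

-- the inner 'for i in range(len(password)-1, -1, -1): … break' loop, carrying 'result'
def pvInnerA (pset : PySem.Set String) (password result : String) : List Int → String
  | [] => result
  | i :: rest =>
    let new_password := pvDelA password i
    if new_password ∈ pset then
      if PySem.Str.len password > PySem.Str.len result ∨
          (PySem.Str.len password = PySem.Str.len result ∧ result < password) then password
      else result
    else pvInnerA pset password result rest

def find_longest_password (passwords : List String) : String :=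
  let password_set : PySem.Set String := PySem.Set.ofList passwords
  passwords.foldl
    (fun result password =>
      pvInnerA password_set password result
        (PySem.List.pyRange (PySem.Str.len password - 1) (-1) (-1)))
    ""

-- ===== PORT B =====
-- any(p[:i] + p[i+1:] in password_set for i in range(len(p)));
-- the deletion expression is the same as A's, shared as pvDelA
def pvHasDel (pset : PySem.Set String) (p : String) : Bool :=
  (PySem.List.pyRange 0 (PySem.Str.len p) 1).any (fun i => decide (pvDelA p i ∈ pset))

-- the 'for p in sorted(…): if …: return p' scan
def pvFirstQual (pset : PySem.Set String) : List String → String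
  | [] => ""
  | p :: rest => if pvHasDel pset p then p else pvFirstQual pset rest

def find_longest_password_alt (passwords : List String) : String :=
  let password_set : PySem.Set String := PySem.Set.ofList passwords
  pvFirstQual password_set
    (PySem.List.sorted2 passwords (fun q => PySem.Str.len q) (fun q => q) true)

-- ===== PRECONDITION & SPEC =====
def Spec_find_longest_password (passwords : List String) (out : String) : Prop := out = find_longest_password_alt passwords
instance (passwords : List String) (out : String) : Decidable (Spec_find_longest_password passwords out) := by unfold Spec_find_longest_password; infer_instance

-- ===== CLAIM (what is proved, stated in full; the proofs are below) =====
def Claim_equal_find_longest_password : Prop := ∀ (passwords : List String), Dom_find_longest_password passwords → Spec_find_longest_password passwords (find_longest_password passwords)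

-- ===== LEMMAS AND PROOFS =====

-- the (length, lexicographic) key both programs compare by
def pvK (p : String) : Lex (Int × String) := toLex (PySem.Str.len p, p)

-- the update A performs on a hit
def pvStep (p r : String) : String := if pvK r < pvK p then p else r

lemma pvK_inj : Function.Injective pvK := by
  intro a b h
  have := congrArg (fun x => (ofLex x).2) h
  simpa [pvK] using this

lemma pvK_lt_iff (r p : String) :
    pvK r < pvK p ↔ (PySem.Str.len r < PySem.Str.len p ∨
      (PySem.Str.len r = PySem.Str.len p ∧ r < p)) := by
  rw [pvK, pvK, Prod.Lex.lt_iff]; simp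

lemma pvBt_iff (p r : String) :
    (PySem.Str.len p > PySem.Str.len r ∨
      (PySem.Str.len p = PySem.Str.len r ∧ r < p)) ↔ pvK r < pvK p := by
  rw [pvK_lt_iff]
  constructor
  · rintro (h | ⟨h1, h2⟩)
    · exact Or.inl h
    · exact Or.inr ⟨h1.symm, h2⟩
  · rintro (h | ⟨h1, h2⟩)
    · exact Or.inl h
    · exact Or.inr ⟨h1.symm, h2⟩

lemma pvInnerA_eq (pset : PySem.Set String) (p r : String) (is : List Int) :
    pvInnerA pset p r is =
      if is.any (fun i => decide (pvDelA p i ∈ pset)) then pvStep p r else r := by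
  induction is with
  | nil => simp [pvInnerA]
  | cons i rest ih =>
    by_cases h : pvDelA p i ∈ pset
    · simp only [pvInnerA, h, if_pos, List.any_cons]
      rw [if_congr (pvBt_iff p r) rfl rfl]
      simp [pvStep]
    · simp only [pvInnerA, h, if_neg, List.any_cons, not_false_iff]
      simp [ih]

lemma pvAnyRange_eq (p : String) (f : Int → Bool) :
    (PySem.List.pyRange (PySem.Str.len p - 1) (-1) (-1)).any f =
      (PySem.List.pyRange 0 (PySem.Str.len p) 1).any f := by
  rw [PySem.List.pyRange_neg_one_eq_reverse]
  have h1 : (-1 : Int) + 1 = 0 := by norm_num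
  have h2 : PySem.Str.len p - 1 + 1 = PySem.Str.len p := by ring
  rw [h1, h2, List.any_reverse]

lemma pvA_eq_filter_foldl (passwords : List String) :
    find_longest_password passwords =
      ((passwords.filter (pvHasDel (PySem.Set.ofList passwords))).foldl
        (fun r p => pvStep p r) "") := by
  show (passwords.foldl
      (fun result password =>
        pvInnerA (PySem.Set.ofList passwords) password result
          (PySem.List.pyRange (PySem.Str.len password - 1) (-1) (-1))) "") = _
  have hfun : (fun result password =>
      pvInnerA (PySem.Set.ofList passwords) password result
        (PySem.List.pyRange (PySem.Str.len password - 1) (-1) (-1))) =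
      (fun (r p : String) =>
        if pvHasDel (PySem.Set.ofList passwords) p then pvStep p r else r) := by
    funext r p
    rw [pvInnerA_eq, pvAnyRange_eq]
    rfl
  rw [hfun]
  exact PySem.List.foldl_if_eq_foldl_filter _ _ _ _

lemma pvFirstQual_eq (pset : PySem.Set String) (l : List String) :
    pvFirstQual pset l = (l.filter (pvHasDel pset)).headD "" := by
  induction l with
  | nil => rfl
  | cons p rest ih =>
    by_cases h : pvHasDel pset p
    · simp [pvFirstQual, h]
    · simp [pvFirstQual, h, ih]

lemma pvBoolAux (m n : Nat) (c : Prop) [Decidable c] :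
    (decide (m < n) || (!decide (n < m) && decide c)) =
      (decide (m < n) || (decide (m = n) && decide c)) := by
  by_cases h1 : m < n
  · simp [h1]
  · by_cases h2 : n < m
    · simp [h1, h2, Nat.ne_of_gt h2]

    · have h3 : m = n := by omega
      simp [h3]

lemma pvBefore_eq (a b : String) :
    (decide (PySem.Str.len b < PySem.Str.len a) ||
      (!decide (PySem.Str.len a < PySem.Str.len b) && decide (b < a)))
    = decide (pvK b < pvK a) := by
  simp only [pvK_lt_iff, Bool.decide_or, Bool.decide_and, PySem.Str.len_eq]
  simp
  exact pvBoolAux b.length a.length _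

lemma pvSorted2_eq (xs : List String) :
    PySem.List.sorted2 xs (fun q => PySem.Str.len q) (fun q => q) true =
      PySem.List.sorted xs pvK true := by
  unfold PySem.List.sorted2 PySem.List.sorted
  simp only [if_pos]
  congr 1
  funext acc x
  congr 1
  funext a b
  exact pvBefore_eq a b

lemma pvFoldl_step_max (l : List String) (init : String) :
    (l.foldl (fun r p => pvStep p r) init) ∈ init :: l ∧
      ∀ y ∈ init :: l, pvK y ≤ pvK (l.foldl (fun r p => pvStep p r) init) := by
  induction l generalizing init with
  | nil => simp
  | cons p t ih =>
    obtain ⟨ihmem, ihbd⟩ := ih (pvStep p init)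
    simp only [List.foldl_cons]
    rw [List.mem_cons] at ihmem
    refine ⟨?_, ?_⟩
    · rcases ihmem with h | h
      · rw [h]
        unfold pvStep
        split_ifs <;> simp
      · simp [h]
    · intro y hy
      rw [List.mem_cons, List.mem_cons] at hy
      rcases hy with h | h | h
      · rw [h]
        have hstep := ihbd (pvStep p init) (List.mem_cons_self ..)
        refine le_trans ?_ hstep
        unfold pvStep
        split_ifs with hc
        · exact le_of_lt hc
        · exact le_refl _
      · rw [h]
        have hstep := ihbd (pvStep p init) (List.mem_cons_self ..)
        refine le_trans ?_ hstep
        unfold pvStep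
        split_ifs with hc
        · exact le_refl _
        · exact le_of_not_gt hc
      · exact ihbd y (by simp [h])

lemma pvHasDel_pos (pset : PySem.Set String) (y : String) (h : pvHasDel pset y = true) :
    0 < PySem.Str.len y := by
  unfold pvHasDel at h
  rw [List.any_eq_true] at h
  obtain ⟨i, hi, -⟩ := h
  rw [PySem.List.mem_pyRange_one] at hi
  omega

lemma pvLen_empty : PySem.Str.len "" = 0 := by decide

theorem pvMain (passwords : List String) :
    find_longest_password passwords = find_longest_password_alt passwords := by
  have hA := pvA_eq_filter_foldl passwords
  have hB : find_longest_password_alt passwords =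
      ((PySem.List.sorted passwords pvK true).filter
        (pvHasDel (PySem.Set.ofList passwords))).headD "" := by
    show pvFirstQual (PySem.Set.ofList passwords)
        (PySem.List.sorted2 passwords (fun q => PySem.Str.len q) (fun q => q) true) = _
    rw [pvSorted2_eq, pvFirstQual_eq]
  rw [hA, hB]
  have hperm : ((PySem.List.sorted passwords pvK true).filter
      (pvHasDel (PySem.Set.ofList passwords))).Perm
      (passwords.filter (pvHasDel (PySem.Set.ofList passwords))) := by
    have h1 : (PySem.List.sorted passwords pvK true).Perm passwords := by
      have := PySem.List.sorted2_perm passwords (fun q => PySem.Str.len q) (fun q => q) true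
      rwa [pvSorted2_eq] at this
    exact h1.filter _
  have hpw : ((PySem.List.sorted passwords pvK true).filter
      (pvHasDel (PySem.Set.ofList passwords))).Pairwise (fun a b => pvK b ≤ pvK a) :=
    List.Pairwise.sublist List.filter_sublist
      (PySem.List.sorted_pairwise_rev passwords pvK)
  obtain ⟨hmem, hbd⟩ :=
    pvFoldl_step_max (passwords.filter (pvHasDel (PySem.Set.ofList passwords))) ""
  cases hSF : ((PySem.List.sorted passwords pvK true).filter
      (pvHasDel (PySem.Set.ofList passwords))) with
  | nil =>
    have hFnil : passwords.filter (pvHasDel (PySem.Set.ofList passwords)) = [] := by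
      have h0 : (passwords.filter (pvHasDel (PySem.Set.ofList passwords))).Perm [] := by
        rw [← hSF]; exact hperm.symm
      exact h0.eq_nil
    rw [hFnil]
    simp
  | cons m t =>
    rw [hSF] at hperm hpw
    have hmF : m ∈ passwords.filter (pvHasDel (PySem.Set.ofList passwords)) :=
      hperm.mem_iff.mp (by simp)
    have hBmax : ∀ y ∈ passwords.filter (pvHasDel (PySem.Set.ofList passwords)),
        pvK y ≤ pvK m := by
      intro y hy
      have hySF : y ∈ m :: t := hperm.mem_iff.mpr hy
      rw [List.mem_cons] at hySF
      rcases hySF with h | h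
      · rw [h]
      · exact (List.pairwise_cons.mp hpw).1 y h
    simp only [List.headD_cons]
    rw [List.mem_cons] at hmem
    rcases hmem with hr0 | hrF
    · exfalso
      have hm := hbd m (by simp [hmF])
      rw [hr0] at hm
      have hqm : pvHasDel (PySem.Set.ofList passwords) m = true := List.of_mem_filter hmF
      have hlen : 0 < PySem.Str.len m := pvHasDel_pos _ m hqm
      have hlt : pvK "" < pvK m := by
        rw [pvK_lt_iff, pvLen_empty]
        exact Or.inl hlen
      exact absurd hm (not_le.mpr hlt)
    · have h1 : pvK (List.foldl (fun r p => pvStep p r) ""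
          (passwords.filter (pvHasDel (PySem.Set.ofList passwords)))) ≤ pvK m :=
        hBmax _ hrF
      have h2 : pvK m ≤ pvK (List.foldl (fun r p => pvStep p r) ""
          (passwords.filter (pvHasDel (PySem.Set.ofList passwords)))) :=
        hbd m (by simp [hmF])
      exact pvK_inj (le_antisymm h1 h2)

-- ===== VERDICT (by name: the statement is the Claim_ definition above) =====
theorem find_longest_password_spec : Claim_equal_find_longest_password := by
  intro passwords _
  unfold Spec_find_longest_password
  exact pvMain passwords
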